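-- pv_equiv track=rewrite | github.com/nastyh/LeetCode | Basic Data Structures/3170_lexicographically_minimum_string_after_removing_stars.py | clearStars_heap
-- ===== SOURCE A (Python) =====
-- import heapq
--
-- def clearStars_heap(s: str) -> str:
--     """
--     O(nlogn) due to the heap
--     O(n) space for the heap
--     Go over the string.
--     If the heap isn't empty and we run into an asterisk
--     take out the lexicographically smallest character
--     -j because we stored the index as negative to prioritize latest indices on tie.
--     Set both the character at position -j and the current '*' to '', effectively removing both.
--
--     If it's not an asterisk, just push the current element and its (negative) index into the heap
--     -i is to ensure if two characters are the same, the one closer to the asterisk (rightmost)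
--     is popped first (lex smallest among those closest to the *).
--     """
--     res = list(s)
--     h = []
--     for i, ch in enumerate(s):
--         if ch == '*' and h:
--             to_delete, j = heapq.heappop(h)
--             res[-j] = ''
--             res[i] = ''
--         else:
--             heapq.heappush(h, (ch, -i))
--     return ''.join(res)
-- ===== SOURCE B (Python) =====
-- def clearStars_heap(s: str) -> str:
--     # One stack of indices per character code; for each star scan the codes
--     # upward, pop the top of the first non-empty stack (rightmost smallest
--     # char), and mark both positions removed.  O(127*n) = O(n), no heap.
--     buckets = [[] for _ in range(127)]
--     removed = [False] * len(s)
--     for i, ch in enumerate(s):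
--         popped = False
--         if ch == '*':
--             for c in range(127):
--                 if buckets[c]:
--                     removed[buckets[c].pop()] = True
--                     removed[i] = True
--                     popped = True
--                     break
--         if not popped:
--             buckets[ord(ch)].append(i)
--     return ''.join(ch for i, ch in enumerate(s) if not removed[i])
-- ===== Notes on version B (the rewrite author's own statement) =====
-- stated objective: faster
-- what changed: Replaces the heap of (char, -index) pairs by 127 per-character index stacks plus a removed-flag array: each star scans the character codes upward and pops the top of the first non-empty stack, removing the O(log n) heap operations.
import Mathlib
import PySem

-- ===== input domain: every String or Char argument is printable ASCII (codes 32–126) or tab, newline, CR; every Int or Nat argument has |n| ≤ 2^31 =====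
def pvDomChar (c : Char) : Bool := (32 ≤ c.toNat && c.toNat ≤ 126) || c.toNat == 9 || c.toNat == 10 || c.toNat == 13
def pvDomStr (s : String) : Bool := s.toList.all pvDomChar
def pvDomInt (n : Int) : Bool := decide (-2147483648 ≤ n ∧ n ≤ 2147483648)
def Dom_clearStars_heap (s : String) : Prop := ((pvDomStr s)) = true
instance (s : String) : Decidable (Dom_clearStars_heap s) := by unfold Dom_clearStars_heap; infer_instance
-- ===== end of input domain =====

-- B replaces A's heap of (char, -index) pairs by one index stack per character
-- code plus a removed-flag array (objective: faster, O(127·n) instead of O(n log n)).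

-- ===== PORT A =====
-- heapq is ported by its contract: the heap holds the multiset of pushed pairs,
-- heappush inserts, heappop removes the lexicographic minimum (pairs are
-- distinct in every run, so the minimum is unique).
def pvLexLt (p q : Char × Int) : Bool :=
  decide (p.1 < q.1) || (p.1 == q.1 && decide (p.2 < q.2))

def pvHeapMin (x : Char × Int) (xs : List (Char × Int)) : Char × Int :=
  xs.foldl (fun m y => if pvLexLt y m then y else m) x

-- one iteration of A's loop body; res[-j] has -j = i ≥ 0, hence the .toNat
def pvStepA (st : List String × List (Char × Int)) (p : Int × Char) :
    List String × List (Char × Int) :=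
  match st, p with
  | (res, h), (i, ch) =>
    if ch = '*' ∧ h ≠ [] then
      match h with
      | hd :: tl =>
          let m := pvHeapMin hd tl
          (((res.set (-m.2).toNat "").set i.toNat ""), (hd :: tl).erase m)
      | [] => (res, h)  -- unreachable: guarded by h ≠ []
    else (res, h ++ [(ch, -i)])

def clearStars_heap (s : String) : String :=
  let cs := s.toList
  let fin := (PySem.List.enumerate cs).foldl pvStepA
      (cs.map (fun c => String.ofList [c]), [])
  PySem.Str.join "" fin.1

-- ===== PORT B =====
-- buckets[code] is the Python list used as a stack, ported with its top at the head
def pvPush (buckets : List (List Int)) (i : Int) (ch : Char) : List (List Int) :=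
  buckets.set ch.toNat (i :: buckets.getD ch.toNat [])

def pvStepB (st : List (List Int) × List Bool) (p : Int × Char) :
    List (List Int) × List Bool :=
  match st, p with
  | (buckets, removed), (i, ch) =>
    if ch = '*' then
      match List.findIdx? (fun b => !b.isEmpty) buckets with
      | some c =>
        match buckets.getD c [] with
        | j :: rest => (buckets.set c rest, (removed.set j.toNat true).set i.toNat true)
        | [] => (pvPush buckets i ch, removed)  -- unreachable: bucket c is non-empty
      | none => (pvPush buckets i ch, removed)
    else (pvPush buckets i ch, removed)

def clearStars_heap_alt (s : String) : String :=
  let cs := s.toList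
  let fin := (PySem.List.enumerate cs).foldl pvStepB
      (List.replicate 127 [], List.replicate cs.length false)
  PySem.Str.join ""
    (((PySem.List.enumerate cs).filter
        (fun p => !(fin.2.getD p.1.toNat false))).map (fun p => String.ofList [p.2]))

-- ===== PRECONDITION & SPEC =====
def Spec_clearStars_heap (s : String) (out : String) : Prop := out = clearStars_heap_alt s
instance (s : String) (out : String) : Decidable (Spec_clearStars_heap s out) := by unfold Spec_clearStars_heap; infer_instance

-- ===== CLAIM (what is proved, stated in full; the proofs are below) =====
def Claim_equal_clearStars_heap : Prop := ∀ (s : String), Dom_clearStars_heap s → Spec_clearStars_heap s (clearStars_heap s)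

-- ===== LEMMAS AND PROOFS =====

-- ordering helpers ---------------------------------------------------------
def pvLe (p q : Char × Int) : Prop := p.1 < q.1 ∨ (p.1 = q.1 ∧ p.2 ≤ q.2)

lemma pvChar_eq_of_toNat {a b : Char} (h : a.toNat = b.toNat) : a = b :=
  Char.ext (UInt32.toNat_inj.mp h)

lemma pvChar_lt_of_toNat {a b : Char} (h : a.toNat < b.toNat) : a < b :=
  UInt32.lt_iff_toNat_lt.mpr h

-- getD helpers --------------------------------------------------------------
lemma pvGetD_set_self (l : List (List Int)) (i : Nat) (hi : i < l.length) (v : List Int) :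
    (l.set i v).getD i [] = v := by
  simp [List.getD_eq_getElem?_getD, List.getElem?_set, hi]

lemma pvGetD_set_ne (l : List (List Int)) (i j : Nat) (hij : i ≠ j) (v : List Int) :
    (l.set i v).getD j [] = l.getD j [] := by
  simp [List.getD_eq_getElem?_getD, List.getElem?_set_ne hij]

lemma pvMem_getD {l : List (List Int)} {code : Nat} {x : Int}
    (hx : x ∈ l.getD code []) : ∃ h : code < l.length, x ∈ l[code] := by
  rw [List.getD_eq_getElem?_getD] at hx
  cases hg : l[code]? with
  | none => rw [hg] at hx; simp at hx
  | some b =>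
    rw [hg] at hx
    simp only [Option.getD_some] at hx
    obtain ⟨hlt, he⟩ := List.getElem?_eq_some_iff.mp hg
    exact ⟨hlt, he ▸ hx⟩

-- the rendering of B's removed-flags as A's res list ------------------------
def pvRender (cs : List Char) (removed : List Bool) : List String :=
  (cs.zip removed).map (fun q => if q.2 then "" else String.ofList [q.1])

-- the loop invariant --------------------------------------------------------
structure pvInv (cs : List Char) (k : Nat) (res : List String) (h : List (Char × Int))
    (buckets : List (List Int)) (removed : List Bool) : Prop where
  blen : buckets.length = 127
  rlen : removed.length = cs.length
  res_eq : res = pvRender cs removed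
  h_src : ∀ p ∈ h, ∃ i : Nat, i < k ∧ p.2 = -(i : Int) ∧ cs[i]? = some p.1
  mem_iff : ∀ (i : Nat) (c : Char), i < k → cs[i]? = some c →
      ((c, -(i : Int)) ∈ h ↔ (i : Int) ∈ buckets.getD c.toNat [])
  b_src : ∀ (code : Nat) (x : Int), x ∈ buckets.getD code [] →
      ∃ i : Nat, x = (i : Int) ∧ i < k ∧ ∃ c, cs[i]? = some c ∧ c.toNat = code
  b_desc : ∀ code : Nat, (buckets.getD code []).Pairwise (· > ·)
  h_nd : h.Pairwise (fun p q => p.2 ≠ q.2)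

lemma pvLexLt_false_iff (p q : Char × Int) : pvLexLt p q = false ↔ pvLe q p := by
  unfold pvLexLt pvLe
  simp only [Bool.or_eq_false_iff, Bool.and_eq_false_iff, decide_eq_false_iff_not, beq_eq_false_iff_ne, ne_eq]
  constructor
  · rintro ⟨h1, h2⟩
    rcases lt_trichotomy p.1 q.1 with h | h | h
    · exact absurd h h1
    · rcases h2 with h2 | h2
      · exact absurd h h2
      · exact Or.inr ⟨h.symm, by omega⟩
    · exact Or.inl h
  · rintro (h | ⟨h1, h2⟩)
    · exact ⟨lt_asymm h, Or.inl (ne_of_gt h)⟩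
    · exact ⟨by rw [h1]; exact lt_irrefl _, Or.inr (by omega)⟩

lemma pvLexLt_true_le (p q : Char × Int) (h : pvLexLt p q = true) : pvLe p q := by
  unfold pvLexLt at h
  simp only [Bool.or_eq_true, Bool.and_eq_true, decide_eq_true_eq, beq_iff_eq] at h
  rcases h with h | ⟨h1, h2⟩
  · exact Or.inl h
  · exact Or.inr ⟨h1, le_of_lt h2⟩

lemma pvLe_trans (p q r : Char × Int) (h1 : pvLe p q) (h2 : pvLe q r) : pvLe p r := by
  rcases h1 with h1 | ⟨h1, h1'⟩ <;> rcases h2 with h2 | ⟨h2, h2'⟩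
  · exact Or.inl (lt_trans h1 h2)
  · exact Or.inl (h2 ▸ h1)
  · exact Or.inl (h1 ▸ h2)
  · exact Or.inr ⟨h1.trans h2, le_trans h1' h2'⟩

lemma pvLe_antisymm (p q : Char × Int) (h1 : pvLe p q) (h2 : pvLe q p) : p = q := by
  obtain ⟨p1, p2⟩ := p; obtain ⟨q1, q2⟩ := q
  rcases h1 with h1 | ⟨h1, h1'⟩ <;> rcases h2 with h2 | ⟨h2, h2'⟩
  · exact absurd h2 (lt_asymm h1)
  · exact absurd h1 (h2 ▸ lt_irrefl _)
  · exact absurd h2 (h1 ▸ lt_irrefl _)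
  · simp only [Prod.mk.injEq]
    exact ⟨h1, by omega⟩

lemma pvHeapMin_mem : ∀ (xs : List (Char × Int)) (x : Char × Int),
    pvHeapMin x xs ∈ x :: xs := by
  intro xs
  induction xs with
  | nil => intro x; simp [pvHeapMin]
  | cons y ys ih =>
    intro x
    have : pvHeapMin x (y :: ys) = pvHeapMin (if pvLexLt y x then y else x) ys := by
      simp [pvHeapMin, List.foldl_cons]
    rw [this]
    have h := ih (if pvLexLt y x then y else x)
    rcases List.mem_cons.mp h with h | h
    · rw [h]; split <;> simp
    · simp [h]

lemma pvHeapMin_le : ∀ (xs : List (Char × Int)) (x : Char × Int),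
    ∀ y ∈ x :: xs, pvLe (pvHeapMin x xs) y := by
  intro xs
  induction xs with
  | nil =>
    intro x y hy
    rcases List.mem_cons.mp hy with h | h
    · rw [h]; exact Or.inr ⟨rfl, le_refl _⟩
    · simp at h
  | cons z zs ih =>
    intro x y hy
    have hrw : pvHeapMin x (z :: zs) = pvHeapMin (if pvLexLt z x then z else x) zs := by
      simp [pvHeapMin, List.foldl_cons]
    rw [hrw]
    have hminf : pvLe (pvHeapMin (if pvLexLt z x then z else x) zs) (if pvLexLt z x then z else x) :=
      ih _ _ (List.mem_cons_self)
    rcases List.mem_cons.mp hy with h | h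
    · -- y = x
      subst h
      by_cases hzx : pvLexLt z y = true
      · rw [if_pos hzx] at hrw hminf ⊢
        exact pvLe_trans _ _ _ hminf (pvLexLt_true_le _ _ hzx)
      · rw [if_neg hzx] at hrw hminf ⊢
        exact hminf
    · rcases List.mem_cons.mp h with h | h
      · -- y = z
        subst h
        by_cases hzx : pvLexLt y x = true
        · rw [if_pos hzx] at hrw hminf ⊢
          exact hminf
        · rw [if_neg hzx] at hrw hminf ⊢
          exact pvLe_trans _ _ _ hminf (pvLexLt_false_iff _ _ |>.mp (Bool.eq_false_iff.mpr hzx))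
      · exact ih _ _ (List.mem_cons_of_mem _ h)

lemma pvRender_set (cs : List Char) (removed : List Bool) (t : Nat)
    (ht : t < cs.length) (hlen : removed.length = cs.length) :
    pvRender cs (removed.set t true) = (pvRender cs removed).set t "" := by
  unfold pvRender
  apply List.ext_getElem
  · simp [hlen]
  · intro n h1 h2
    simp only [List.getElem_map, List.getElem_zip, List.getElem_set]
    by_cases hn : t = n
    · subst hn
      simp [List.getElem_set_self, List.length_zip, List.length_map, hlen, ht]
    · simp [List.getElem_set_ne hn, hn]

lemma pvRender_init (cs : List Char) :
    cs.map (fun c => String.ofList [c]) = pvRender cs (List.replicate cs.length false) := by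
  unfold pvRender
  induction cs with
  | nil => rfl
  | cons c cs ih => simp only [List.map_cons, List.length_cons, List.replicate_succ,
      List.zip_cons_cons] at *; simp [ih]

lemma pvJoin_flatten : ∀ l : List (List Char), PySem.Chars.join [] l = l.flatten := by
  intro l
  induction l with
  | nil => simp [PySem.Chars.join_nil]
  | cons a t ih =>
    cases t with
    | nil => simp [PySem.Chars.join_singleton]
    | cons b t' => rw [PySem.Chars.join_cons_cons]; simp_all

lemma pvFilt : ∀ (cs : List Char) (rpre rcur : List Bool), rcur.length = cs.length →
    ((pvRender cs rcur).map String.toList).flatten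
      = ((((PySem.List.enumerate cs ((rpre.length : Int))).filter
          (fun p => !((rpre ++ rcur).getD p.1.toNat false))).map
            (fun p => (String.ofList [p.2]).toList)).flatten) := by
  intro cs
  induction cs with
  | nil =>
    intro rpre rcur hlen
    have : rcur = [] := List.eq_nil_of_length_eq_zero (by simpa using hlen)
    subst this
    simp [pvRender, PySem.List.enumerate]
  | cons c cs ih =>
    intro rpre rcur hlen
    cases rcur with
    | nil => simp at hlen
    | cons b r' =>
      have hlen' : r'.length = cs.length := by simpa using hlen
      rw [PySem.List.enumerate_cons]
      have hhead : ((rpre ++ b :: r').getD ((rpre.length : Int)).toNat false) = b := by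
        simp [List.getD_eq_getElem?_getD, List.getElem?_append_right (le_refl rpre.length)]
      have hs : ((rpre.length : Int) + 1) = (((rpre ++ [b]).length : Int)) := by
        simp
      have happ : (rpre ++ [b]) ++ r' = rpre ++ b :: r' := by simp
      have ihh := ih (rpre ++ [b]) r' hlen'
      rw [happ] at ihh
      have hfc : ∀ (t : List (Int × Char)) , True := fun _ => trivial
      rw [List.filter_cons]
      cases b with
      | true =>
        rw [if_neg (by simp [hhead])]
        simp only [pvRender, List.zip_cons_cons, List.map_cons, List.flatten_cons, if_pos rfl]
        rw [hs]
        simpa [pvRender] using ihh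
      | false =>
        rw [if_pos (by simp [hhead])]
        simp only [pvRender, List.zip_cons_cons, List.map_cons, List.flatten_cons,
          Bool.false_eq_true, if_neg (by simp : ¬ (false = true))]
        rw [hs]
        simp only [pvRender] at ihh
        rw [ihh]
        simp

lemma pvInit_inv (cs : List Char) :
    pvInv cs 0 (cs.map (fun c => String.ofList [c])) []
      (List.replicate 127 []) (List.replicate cs.length false) := by
  have hget : ∀ code : Nat, (List.replicate 127 ([] : List Int)).getD code [] = [] := by
    intro code
    rw [List.getD_eq_getElem?_getD, List.getElem?_replicate]
    split <;> simp
  refine ⟨by simp, by simp, pvRender_init cs, ?_, ?_, ?_, ?_, ?_⟩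
  · intro p hp; simp at hp
  · intro i c hi _; omega
  · intro code x hx; rw [hget] at hx; simp at hx
  · intro code; rw [hget]; exact List.Pairwise.nil
  · exact List.Pairwise.nil

lemma pvFind_none_iff (cs : List Char) (k : Nat) (res : List String)
    (h : List (Char × Int)) (buckets : List (List Int)) (removed : List Bool)
    (inv : pvInv cs k res h buckets removed) :
    List.findIdx? (fun b => !b.isEmpty) buckets = none ↔ h = [] := by
  rw [List.findIdx?_eq_none_iff]
  constructor
  · intro hall
    cases hh : h with
    | nil => rfl
    | cons hd tl =>
      exfalso
      obtain ⟨i, hik, hsnd, hcs⟩ := inv.h_src hd (hh ▸ List.mem_cons_self)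
      have hmem : (hd.1, -(i : Int)) ∈ h := hsnd ▸ (by simp : (hd.1, hd.2) = hd) ▸ (hh ▸ List.mem_cons_self)
      have hbmem := (inv.mem_iff i hd.1 hik hcs).mp hmem
      obtain ⟨hlt, hx⟩ := pvMem_getD hbmem
      have := hall (buckets[hd.1.toNat]'hlt) (List.getElem_mem hlt)
      simp only [Bool.not_eq_false'] at this
      rw [List.isEmpty_iff] at this
      rw [this] at hx
      simp at hx
  · intro hh b hb
    simp only [Bool.not_eq_false']
    by_contra hne
    have hbne : b ≠ [] := by
      intro e; rw [e] at hne; simp at hne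
    obtain ⟨x, hx⟩ := List.exists_mem_of_ne_nil b hbne
    obtain ⟨code, hcode, hbe⟩ := List.mem_iff_getElem.mp hb
    have hxg : x ∈ buckets.getD code [] := by
      rw [List.getD_eq_getElem?_getD, List.getElem?_eq_getElem hcode, hbe]
      simpa using hx
    obtain ⟨i, hxi, hik, c, hcs, hcnat⟩ := inv.b_src code x hxg
    have := (inv.mem_iff i c hik hcs).mpr (hcnat ▸ hxi ▸ hxg)
    rw [hh] at this
    simp at this

lemma pvPush_inv (cs : List Char) (hdom : ∀ c ∈ cs, c.toNat < 127) (k : Nat)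
    (hk : k < cs.length) (res : List String) (h : List (Char × Int))
    (buckets : List (List Int)) (removed : List Bool)
    (inv : pvInv cs k res h buckets removed) :
    pvInv cs (k+1) res (h ++ [(cs[k], -(k : Int))]) (pvPush buckets (k : Int) cs[k]) removed := by
  set ch := cs[k] with hch
  have hcode : ch.toNat < buckets.length := by
    rw [inv.blen]; exact hdom ch (List.getElem_mem hk)
  have hgetself : (pvPush buckets (k : Int) ch).getD ch.toNat []
      = (k : Int) :: buckets.getD ch.toNat [] := by
    unfold pvPush; exact pvGetD_set_self _ _ hcode _
  have hgetne : ∀ code : Nat, code ≠ ch.toNat →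
      (pvPush buckets (k : Int) ch).getD code [] = buckets.getD code [] := by
    intro code hc; unfold pvPush; exact pvGetD_set_ne _ _ _ (fun e => hc e.symm) _
  refine ⟨by simp [pvPush, inv.blen], inv.rlen, inv.res_eq, ?_, ?_, ?_, ?_, ?_⟩
  · -- h_src
    intro p hp
    rcases List.mem_append.mp hp with hp | hp
    · obtain ⟨i, hik, h2, h3⟩ := inv.h_src p hp
      exact ⟨i, by omega, h2, h3⟩
    · simp only [List.mem_singleton] at hp
      subst hp
      exact ⟨k, by omega, rfl, List.getElem?_eq_getElem hk⟩
  · -- mem_iff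
    intro i c hi hc
    rcases Nat.lt_succ_iff_lt_or_eq.mp hi with hik | hik
    · have hne : ((c, -(i : Int)) : Char × Int) ≠ (ch, -(k : Int)) := by
        intro e
        have h5 : -(i : Int) = -(k : Int) := congrArg Prod.snd e
        have : i = k := by omega
        omega
      rw [List.mem_append, List.mem_singleton]
      by_cases hcc : c.toNat = ch.toNat
      · have hcch : c = ch := pvChar_eq_of_toNat hcc
        subst hcch
        rw [hgetself]
        constructor
        · rintro (hm | he)
          · exact List.mem_cons_of_mem _ ((inv.mem_iff i ch hik hc).mp hm)
          · exact absurd he hne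
        · intro hm
          rcases List.mem_cons.mp hm with he | hm
          · exfalso
            have h5 : (i : Int) = (k : Int) := he
            omega
          · exact Or.inl ((inv.mem_iff i ch hik hc).mpr hm)
      · rw [hgetne c.toNat hcc, ← inv.mem_iff i c hik hc]
        constructor
        · rintro (hm | he)
          · exact hm
          · exact absurd he hne
        · exact fun hm => Or.inl hm
    · subst hik
      have hcc : c = ch := by
        rw [List.getElem?_eq_getElem hk] at hc
        exact (Option.some_inj.mp hc).symm
      subst hcc
      rw [hgetself]
      apply iff_of_true
      · exact List.mem_append_right _ (List.mem_singleton_self _)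
      · exact List.mem_cons_self
  · -- b_src
    intro code x hx
    by_cases hcc : code = ch.toNat
    · subst hcc
      rw [hgetself] at hx
      rcases List.mem_cons.mp hx with he | hx
      · exact ⟨k, he, by omega, ch, List.getElem?_eq_getElem hk, rfl⟩
      · obtain ⟨i, h1, h2, c, h3, h4⟩ := inv.b_src _ x hx
        exact ⟨i, h1, by omega, c, h3, h4⟩
    · rw [hgetne code hcc] at hx
      obtain ⟨i, h1, h2, c, h3, h4⟩ := inv.b_src code x hx
      exact ⟨i, h1, by omega, c, h3, h4⟩
  · -- b_desc
    intro code
    by_cases hcc : code = ch.toNat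
    · subst hcc
      rw [hgetself]
      rw [List.pairwise_cons]
      refine ⟨?_, inv.b_desc _⟩
      intro x hx
      obtain ⟨i, h1, h2, _⟩ := inv.b_src _ x hx
      subst h1
      exact_mod_cast h2
    · rw [hgetne code hcc]; exact inv.b_desc code
  · -- h_nd
    rw [List.pairwise_append]
    refine ⟨inv.h_nd, List.pairwise_singleton _ _, ?_⟩
    intro p hp b hb
    simp only [List.mem_singleton] at hb
    subst hb
    obtain ⟨i, hik, h2, _⟩ := inv.h_src p hp
    rw [h2]
    intro e
    simp only at e
    omega

lemma pvStep_inv (cs : List Char) (hdom : ∀ c ∈ cs, c.toNat < 127) (k : Nat)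
    (hk : k < cs.length) (res : List String) (h : List (Char × Int))
    (buckets : List (List Int)) (removed : List Bool)
    (inv : pvInv cs k res h buckets removed) :
    pvInv cs (k+1)
      (pvStepA (res, h) ((k : Int), cs[k])).1 (pvStepA (res, h) ((k : Int), cs[k])).2
      (pvStepB (buckets, removed) ((k : Int), cs[k])).1
      (pvStepB (buckets, removed) ((k : Int), cs[k])).2 := by
  by_cases hpop : cs[k] = '*' ∧ h ≠ []
  · obtain ⟨hstar, hne⟩ := hpop
    obtain ⟨hd, tl, hh⟩ := List.exists_cons_of_ne_nil hne
    subst hh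
    -- the bucket scan finds some non-empty bucket
    obtain ⟨cmin, hfind⟩ : ∃ cmin, List.findIdx? (fun b => !b.isEmpty) buckets = some cmin := by
      cases hf : List.findIdx? (fun b => !b.isEmpty) buckets with
      | none => exact absurd ((pvFind_none_iff cs k res _ buckets removed inv).mp hf) (by simp)
      | some c => exact ⟨c, rfl⟩
    obtain ⟨hclen, hcne, hcmin_min⟩ := List.findIdx?_eq_some_iff_getElem.mp hfind
    have hbd : buckets.getD cmin [] = buckets[cmin] := by
      rw [List.getD_eq_getElem?_getD, List.getElem?_eq_getElem hclen]; rfl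
    obtain ⟨j, rest, hjrest⟩ : ∃ j rest, buckets[cmin] = j :: rest := by
      cases e : buckets[cmin] with
      | nil => rw [e] at hcne; simp at hcne
      | cons a b => exact ⟨a, b, rfl⟩
    have hjmem : j ∈ buckets.getD cmin [] := by rw [hbd, hjrest]; exact List.mem_cons_self
    obtain ⟨j₀, hj₀, hj₀k, cstar, hcsj, hcodeEq⟩ := inv.b_src cmin j hjmem
    have hj₀lt : j₀ < cs.length := (List.getElem?_eq_some_iff.mp hcsj).1
    have hz : (cstar, -(j₀ : Int)) ∈ hd :: tl :=
      (inv.mem_iff j₀ cstar hj₀k hcsj).mpr (by rw [hcodeEq, ← hj₀]; exact hjmem)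
    have hzmin : ∀ p ∈ hd :: tl, pvLe (cstar, -(j₀ : Int)) p := by
      intro p hp
      obtain ⟨i, hik, hp2, hpc⟩ := inv.h_src p hp
      have hpeq : p = (p.1, -(i : Int)) := by rw [← hp2]
      have hmemb : (i : Int) ∈ buckets.getD p.1.toNat [] :=
        (inv.mem_iff i p.1 hik hpc).mp (hpeq ▸ hp)
      obtain ⟨hlt, hib⟩ := pvMem_getD hmemb
      have hge : cmin ≤ p.1.toNat := by
        by_contra hlt2
        rw [not_le] at hlt2
        have hemp := hcmin_min p.1.toNat hlt2
        simp only [Bool.not_eq_true, Bool.not_eq_false'] at hemp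
        rw [List.isEmpty_iff] at hemp
        rw [hemp] at hib
        simp at hib
      rcases lt_or_eq_of_le hge with hlt3 | heq
      · exact Or.inl (pvChar_lt_of_toNat (hcodeEq ▸ hlt3 : cstar.toNat < p.1.toNat))
      · have hp1 : p.1 = cstar := pvChar_eq_of_toNat (by rw [← heq, hcodeEq])
        refine Or.inr ⟨hp1.symm, ?_⟩
        rw [hp2]
        have hmemc : (i : Int) ∈ j :: rest := by
          rw [← hjrest, ← hbd, heq]; exact hmemb
        rcases List.mem_cons.mp hmemc with he | hmr
        · have : (i : Int) = (j₀ : Int) := by rw [he, hj₀]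
          simp only [neg_le_neg_iff]
          omega
        · have hdesc := inv.b_desc cmin
          rw [hbd, hjrest] at hdesc
          have := (List.pairwise_cons.mp hdesc).1 _ hmr
          rw [hj₀] at this
          simp only [neg_le_neg_iff]
          have : (i : Int) < (j₀ : Int) := this
          omega
    have hm : pvHeapMin hd tl = (cstar, -(j₀ : Int)) :=
      pvLe_antisymm _ _ (pvHeapMin_le tl hd _ hz) (hzmin _ (pvHeapMin_mem tl hd))
    have hnodup : (hd :: tl).Nodup :=
      inv.h_nd.imp (fun hne2 he => absurd (congrArg Prod.snd he) hne2)
    -- reduce both steps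
    have hA : pvStepA (res, hd :: tl) ((k : Int), cs[k])
        = ((res.set j₀ "").set k "", (hd :: tl).erase (cstar, -(j₀ : Int))) := by
      simp only [pvStepA]
      rw [if_pos ⟨hstar, by simp⟩]
      simp [hm]
    have hB : pvStepB (buckets, removed) ((k : Int), cs[k])
        = (buckets.set cmin rest, (removed.set j₀ true).set k true) := by
      simp only [pvStepB]
      rw [if_pos hstar, hfind]
      simp only [hbd, hjrest, hj₀]
      simp
    rw [hA, hB]
    have b_src' : ∀ (code : Nat) (x : Int), x ∈ (buckets.set cmin rest).getD code [] →
        ∃ i : Nat, x = (i : Int) ∧ i < k ∧ ∃ c, cs[i]? = some c ∧ c.toNat = code := by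
      intro code x hx
      by_cases hcc : code = cmin
      · subst hcc
        rw [pvGetD_set_self _ _ hclen _] at hx
        exact inv.b_src _ x (by rw [hbd, hjrest]; exact List.mem_cons_of_mem _ hx)
      · rw [pvGetD_set_ne _ _ _ (fun e => hcc e.symm) _] at hx
        exact inv.b_src code x hx
    refine ⟨by simp [inv.blen], by simp [inv.rlen], ?_, ?_, ?_, ?_, ?_, ?_⟩
    · -- res_eq
      simp only
      rw [inv.res_eq, ← pvRender_set cs removed j₀ hj₀lt inv.rlen,
        ← pvRender_set cs _ k hk (by simp [inv.rlen])]
    · -- h_src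
      intro p hp
      obtain ⟨i, hik, h2, h3⟩ := inv.h_src p (List.mem_of_mem_erase hp)
      exact ⟨i, by omega, h2, h3⟩
    · -- mem_iff
      intro i c hi hc
      rcases Nat.lt_succ_iff_lt_or_eq.mp hi with hik | hik
      · rw [hnodup.mem_erase_iff]
        by_cases hcc : c.toNat = cmin
        · have hceq : c = cstar := pvChar_eq_of_toNat (hcc.trans hcodeEq.symm)
          rw [hcc, pvGetD_set_self _ _ hclen _]
          constructor
          · rintro ⟨hne2, hmem⟩
            have h6 := (inv.mem_iff i c hik hc).mp hmem
            rw [hcc, hbd, hjrest] at h6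
            rcases List.mem_cons.mp h6 with he | hmr
            · exfalso
              apply hne2
              have h7 : (i : Int) = (j₀ : Int) := by rw [he, hj₀]
              have h8 : i = j₀ := by exact_mod_cast h7
              rw [hceq, h8]
            · exact hmr
          · intro hmr
            have hij : (i : Int) ≠ j := by
              intro e
              have hjmemr : j ∈ rest := e ▸ hmr
              have hdesc := inv.b_desc cmin
              rw [hbd, hjrest] at hdesc
              exact absurd ((List.pairwise_cons.mp hdesc).1 j hjmemr) (lt_irrefl j)
            refine ⟨?_, (inv.mem_iff i c hik hc).mpr ?_⟩
            · intro e
              apply hij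
              have h5 : -(i : Int) = -(j₀ : Int) := congrArg Prod.snd e
              rw [hj₀]
              omega
            · rw [hcc, hbd, hjrest]
              exact List.mem_cons_of_mem _ hmr
        · have hcne2 : c ≠ cstar := fun e => hcc (by rw [e, hcodeEq])
          rw [pvGetD_set_ne _ _ _ (fun e => hcc e.symm) _, ← inv.mem_iff i c hik hc]
          constructor
          · rintro ⟨_, hmem⟩
            exact hmem
          · intro hmem
            exact ⟨fun e => hcne2 (congrArg Prod.fst e), hmem⟩
      · subst hik
        apply iff_of_false
        · intro hmem
          obtain ⟨i2, hi2, h2, _⟩ := inv.h_src _ (List.mem_of_mem_erase hmem)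
          simp only [neg_inj] at h2
          have : i = i2 := by exact_mod_cast h2
          omega
        · intro hmem
          obtain ⟨i2, he, hi2, _⟩ := b_src' _ _ hmem
          have : i = i2 := by exact_mod_cast he
          omega
    · -- b_src
      intro code x hx
      obtain ⟨i, h1, h2, h3⟩ := b_src' code x hx
      exact ⟨i, h1, by omega, h3⟩
    · -- b_desc
      intro code
      by_cases hcc : code = cmin
      · rw [hcc, pvGetD_set_self _ _ hclen _]
        have hdesc := inv.b_desc cmin
        rw [hbd, hjrest] at hdesc
        exact (List.pairwise_cons.mp hdesc).2
      · rw [pvGetD_set_ne _ _ _ (fun e => hcc e.symm) _]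
        exact inv.b_desc code
    · -- h_nd
      exact inv.h_nd.sublist (List.erase_sublist)
  · -- push case
    have hA : pvStepA (res, h) ((k : Int), cs[k]) = (res, h ++ [(cs[k], -(k : Int))]) := by
      simp only [pvStepA]
      rw [if_neg hpop]
    have hB : pvStepB (buckets, removed) ((k : Int), cs[k])
        = (pvPush buckets (k : Int) cs[k], removed) := by
      by_cases hstar : cs[k] = '*'
      · have hhe : h = [] := by
          by_contra hne
          exact hpop ⟨hstar, hne⟩
        have hfind := (pvFind_none_iff cs k res h buckets removed inv).mpr hhe
        simp only [pvStepB]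
        rw [if_pos hstar, hfind]
      · simp only [pvStepB]
        rw [if_neg hstar]
    rw [hA, hB]
    exact pvPush_inv cs hdom k hk res h buckets removed inv

lemma pvMain (cs : List Char) (hdom : ∀ c ∈ cs, c.toNat < 127) :
    ∀ (fuel k : Nat) (res : List String) (h : List (Char × Int))
      (buckets : List (List Int)) (removed : List Bool),
    cs.length - k ≤ fuel → pvInv cs k res h buckets removed →
    (((PySem.List.enumerate cs).drop k).foldl pvStepA (res, h)).1
      = pvRender cs ((((PySem.List.enumerate cs).drop k).foldl pvStepB (buckets, removed)).2)
    ∧ ((((PySem.List.enumerate cs).drop k).foldl pvStepB (buckets, removed)).2).length = cs.length := by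
  intro fuel
  induction fuel with
  | zero =>
    intro k res h buckets removed hfuel inv
    have hk : cs.length ≤ k := by omega
    rw [List.drop_eq_nil_of_le (by rw [PySem.List.length_enumerate]; exact hk)]
    simpa [inv.rlen] using inv.res_eq
  | succ fuel ih =>
    intro k res h buckets removed hfuel inv
    by_cases hk : k < cs.length
    · have hdrop : (PySem.List.enumerate cs).drop k
          = ((k : Int), cs[k]) :: (PySem.List.enumerate cs).drop (k+1) := by
        rw [List.drop_eq_getElem_cons (by rw [PySem.List.length_enumerate]; exact hk)]
        congr 1
        rw [PySem.List.getElem_enumerate]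
        simp
      rw [hdrop]
      simp only [List.foldl_cons]
      have step := pvStep_inv cs hdom k hk res h buckets removed inv
      have main := ih (k+1)
        (pvStepA (res, h) ((k : Int), cs[k])).1 (pvStepA (res, h) ((k : Int), cs[k])).2
        (pvStepB (buckets, removed) ((k : Int), cs[k])).1
        (pvStepB (buckets, removed) ((k : Int), cs[k])).2
        (by omega) step
      simpa using main
    · have hk2 : cs.length ≤ k := by omega
      rw [List.drop_eq_nil_of_le (by rw [PySem.List.length_enumerate]; exact hk2)]
      simpa [inv.rlen] using inv.res_eq

theorem pvAB_eq : ∀ (s : String), Dom_clearStars_heap s → clearStars_heap s = clearStars_heap_alt s := by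
  intro s hdomS
  unfold Dom_clearStars_heap pvDomStr at hdomS
  have hdom' : ∀ c ∈ s.toList, c.toNat < 127 := by
    intro c hc
    have h1 := List.all_eq_true.mp hdomS c hc
    simp only [pvDomChar, Bool.or_eq_true, Bool.and_eq_true, decide_eq_true_eq,
      beq_iff_eq] at h1
    omega
  unfold clearStars_heap clearStars_heap_alt
  simp only
  have main := pvMain s.toList hdom' s.toList.length 0
      (s.toList.map (fun c => String.ofList [c])) [] (List.replicate 127 [])
      (List.replicate s.toList.length false) (by omega) (pvInit_inv s.toList)
  rw [List.drop_zero] at main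
  obtain ⟨hres, hlen⟩ := main
  apply (fun h => by simpa using congrArg String.ofList h :
    (_ : String).toList = (_ : String).toList → _)
  rw [PySem.Str.toList_join, PySem.Str.toList_join]
  have hemp : ("" : String).toList = [] := by simp
  rw [hemp, pvJoin_flatten, pvJoin_flatten, hres]
  have hf := pvFilt s.toList [] _ hlen
  simpa [List.map_map, Function.comp_def] using hf

-- ===== VERDICT (by name: the statement is the Claim_ definition above) =====
theorem clearStars_heap_spec : Claim_equal_clearStars_heap := by
  intro s hdom
  unfold Spec_clearStars_heap
  exact pvAB_eq s hdom
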